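-- pv_equiv track=rewrite | github.com/e2izaveta/AS_Python_1sem | 1.1lab/main.py | count_favorable_outcomes
-- ===== SOURCE A (Python) =====
-- def count_favorable_outcomes(target_sum):
--     """
--     Подсчет количества элементарных исходов, когда сумма очков на двух кубиках равна target_sum
--
--     Args:
--         target_sum: целевая сумма очков
--
--     Returns:
--         count: количество благоприятных исходов
--         outcomes: список благоприятных исходов в виде кортежей (первый бросок, второй бросок)
--     """
--     count = 0
--     outcomes = []
--
--     # Перебираем все возможные результаты первого броска (от 1 до 6)
--     for first_roll in range(1, 7):
--         # Перебираем все возможные результаты второго броска (от 1 до 6)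
--         for second_roll in range(1, 7):
--             # Проверяем, равна ли сумма целевому значению
--             if first_roll + second_roll == target_sum:
--                 count += 1
--                 outcomes.append((first_roll, second_roll))
--
--     return count, outcomes
-- ===== SOURCE B (Python) =====
-- def count_favorable_outcomes(target_sum):
--     lo = max(1, target_sum - 6)
--     hi = min(6, target_sum - 1)
--     outcomes = [(i, target_sum - i) for i in range(lo, hi + 1)]
--     return len(outcomes), outcomes
-- ===== Notes on version B (the rewrite author's own statement) =====
-- stated objective: simpler
-- what changed: Replaces the nested 6x6 scan by a closed form: the valid first rolls form the contiguous interval [max(1, target_sum-6), min(6, target_sum-1)], so the outcome list is built directly as a range comprehension and the count is its length.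
import Mathlib
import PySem

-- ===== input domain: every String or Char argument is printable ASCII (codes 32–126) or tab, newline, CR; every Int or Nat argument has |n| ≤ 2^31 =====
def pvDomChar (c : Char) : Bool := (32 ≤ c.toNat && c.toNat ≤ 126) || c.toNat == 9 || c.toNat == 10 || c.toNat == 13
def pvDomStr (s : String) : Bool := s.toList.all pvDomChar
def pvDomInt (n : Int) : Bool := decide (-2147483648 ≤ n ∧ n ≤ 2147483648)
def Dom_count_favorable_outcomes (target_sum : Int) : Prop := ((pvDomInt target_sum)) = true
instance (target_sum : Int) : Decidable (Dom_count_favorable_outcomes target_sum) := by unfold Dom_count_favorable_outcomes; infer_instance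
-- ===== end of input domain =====

-- B computes the outcome list in closed form from the interval of valid first rolls; objective: simpler.
-- ===== PORT A =====
def count_favorable_outcomes (target_sum : Int) : Int × (List (Int × Int)) :=
  (PySem.List.pyRange 1 7 1).foldl (fun st first_roll =>
    (PySem.List.pyRange 1 7 1).foldl (fun st second_roll =>
      if first_roll + second_roll = target_sum then
        (st.1 + 1, st.2 ++ [(first_roll, second_roll)])
      else st) st) (0, [])

-- ===== PORT B =====
def count_favorable_outcomes_alt (target_sum : Int) : Int × (List (Int × Int)) :=
  let lo := max 1 (target_sum - 6)
  let hi := min 6 (target_sum - 1)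
  let outcomes := (PySem.List.pyRange lo (hi + 1) 1).map (fun i => (i, target_sum - i))
  ((outcomes.length : Int), outcomes)

-- ===== PRECONDITION & SPEC =====
def Spec_count_favorable_outcomes (target_sum : Int) (out : Int × (List (Int × Int))) : Prop := out = count_favorable_outcomes_alt target_sum
instance (target_sum : Int) (out : Int × (List (Int × Int))) : Decidable (Spec_count_favorable_outcomes target_sum out) := by unfold Spec_count_favorable_outcomes; infer_instance

-- ===== CLAIM (what is proved, stated in full; the proofs are below) =====
def Claim_equal_count_favorable_outcomes : Prop := ∀ (target_sum : Int), Dom_count_favorable_outcomes target_sum → Spec_count_favorable_outcomes target_sum (count_favorable_outcomes target_sum)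

-- ===== LEMMAS AND PROOFS =====
lemma pv_fold_id {α β : Type} (l : List α) (f : β → α → β) (st : β)
    (h : ∀ s a, a ∈ l → f s a = s) : l.foldl f st = st := by
  induction l generalizing st with
  | nil => rfl
  | cons x xs ih =>
      rw [List.foldl_cons, h st x (List.mem_cons_self ..)]
      exact ih st (fun s a ha => h s a (List.mem_cons_of_mem _ ha))

lemma pvA_off (t : Int) (hlt : t < 2 ∨ 12 < t) : count_favorable_outcomes t = (0, []) := by
  unfold count_favorable_outcomes
  apply pv_fold_id
  intro s a ha
  apply pv_fold_id
  intro s2 b hb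
  have h1 := PySem.List.mem_pyRange_one.mp ha
  have h2 := PySem.List.mem_pyRange_one.mp hb
  rw [if_neg (by omega)]

lemma pvB_off (t : Int) (hlt : t < 2 ∨ 12 < t) : count_favorable_outcomes_alt t = (0, []) := by
  unfold count_favorable_outcomes_alt
  have h : PySem.List.pyRange (max 1 (t - 6)) (min 6 (t - 1) + 1) 1 = [] := by
    rw [PySem.List.pyRange_one]
    have : (min 6 (t - 1) + 1 - max 1 (t - 6)).toNat = 0 := by omega
    simp [this]
  simp [h]

-- ===== VERDICT (by name: the statement is the Claim_ definition above) =====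
set_option maxHeartbeats 1600000 in
theorem count_favorable_outcomes_spec : Claim_equal_count_favorable_outcomes := by
  intro t _
  unfold Spec_count_favorable_outcomes
  by_cases hin : 2 ≤ t ∧ t ≤ 12
  · obtain ⟨h1, h2⟩ := hin
    interval_cases t <;> decide
  · have h : t < 2 ∨ 12 < t := by omega
    rw [pvA_off t h, pvB_off t h]
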